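-- pv_equiv track=rewrite | github.com/thijmenVerstraete-ucll/numberPuzzle | slidePuzzle.py | generatePuzzle
-- ===== SOURCE A (Python) =====
-- def generatePuzzle(width, height):
--     output = []
--
--     # Exaple: [[1, 2, 3], [4, 5, 6], [7, 8, 9]]
--     num = 1
--     row = []
--     for i in range(1, height+1):
--         for j in range(1, width+1):
--             row.append(num)
--             num += 1
--         output.append(row)
--         row = []
--     output[-1][-1] = 0
--     return output
-- ===== SOURCE B (Python) =====
-- def generatePuzzle(width, height):
--     nums = list(range(1, width * height + 1))
--     output = [nums[i * width:(i + 1) * width] for i in range(height)]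
--     output[-1][-1] = 0
--     return output
-- ===== Notes on version B (the rewrite author's own statement) =====
-- stated objective: simpler
-- what changed: B builds the flat sequence 1..width*height once and derives each row by index slicing, instead of A's nested loops accumulating a running counter cell by cell.
import Mathlib
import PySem

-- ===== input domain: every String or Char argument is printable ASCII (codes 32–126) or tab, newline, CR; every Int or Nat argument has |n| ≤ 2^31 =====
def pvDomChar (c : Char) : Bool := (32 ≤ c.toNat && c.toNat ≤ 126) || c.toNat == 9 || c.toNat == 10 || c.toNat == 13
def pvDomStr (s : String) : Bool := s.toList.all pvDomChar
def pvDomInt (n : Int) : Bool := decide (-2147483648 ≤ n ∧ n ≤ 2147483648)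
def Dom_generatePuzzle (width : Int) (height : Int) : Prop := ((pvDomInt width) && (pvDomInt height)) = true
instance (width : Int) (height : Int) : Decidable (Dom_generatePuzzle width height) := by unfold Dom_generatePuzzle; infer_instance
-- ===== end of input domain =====

-- B replaces A's nested counting loops by one flat range reshaped with slices (objective: simpler).

-- ===== PORT A =====
-- `row[-1] = 0` on a nonempty list: replace the last element by 0 (Python raises on [],
-- excluded by Pre_). Shared by both ports, since both Pythons end with `output[-1][-1] = 0`.
def setLast0 : List Int → List Int
  | [] => []
  | [_] => [0]
  | x :: y :: t => x :: setLast0 (y :: t)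

-- `output[-1][-1] = 0`: rewrite the last row in place (exact when output and its last row
-- are nonempty, which Pre_ guarantees; Python raises IndexError otherwise).
def setLastLast : List (List Int) → List (List Int)
  | [] => []
  | [r] => [setLast0 r]
  | r :: s :: t => r :: setLastLast (s :: t)

-- body of A's inner `for j` loop: row.append(num); num += 1
def stepInner (p : Int × List Int) (_j : Int) : Int × List Int := (p.1 + 1, p.2 ++ [p.1])

-- body of A's outer `for i` loop
def stepOuter (width : Int) (st : List (List Int) × Int × List Int) (_i : Int) :
    List (List Int) × Int × List Int :=
  let inner := (PySem.List.pyRange 1 (width + 1) 1).foldl stepInner (st.2.1, st.2.2)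
  (st.1 ++ [inner.2], inner.1, [])

def generatePuzzle (width : Int) (height : Int) : List (List Int) :=
  let st := (PySem.List.pyRange 1 (height + 1) 1).foldl (stepOuter width) ([], 1, [])
  setLastLast st.1

-- ===== PORT B =====
def generatePuzzle_alt (width : Int) (height : Int) : List (List Int) :=
  let nums := PySem.List.pyRange 1 (width * height + 1) 1
  let output := (PySem.List.pyRange 0 height 1).map
    (fun i => PySem.List.slice nums (some (i * width)) (some ((i + 1) * width)))
  setLastLast output

-- ===== PRECONDITION & SPEC =====
-- Pre_ excludes exactly width ≤ 0 or height ≤ 0, where both Pythons raise IndexError at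
-- `output[-1][-1] = 0` (empty output, or an empty last row).
def Pre_generatePuzzle (width : Int) (height : Int) : Prop := 1 ≤ width ∧ 1 ≤ height
instance (width : Int) (height : Int) : Decidable (Pre_generatePuzzle width height) := by
  unfold Pre_generatePuzzle; infer_instance

def pvWitness_generatePuzzle : Int × Int := (3, 3)

def Spec_generatePuzzle (width : Int) (height : Int) (out : List (List Int)) : Prop := out = generatePuzzle_alt width height
instance (width : Int) (height : Int) (out : List (List Int)) : Decidable (Spec_generatePuzzle width height out) := by unfold Spec_generatePuzzle; infer_instance

-- ===== CLAIM (what is proved, stated in full; the proofs are below) =====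
def Claim_equal_generatePuzzle : Prop := ∀ (width : Int) (height : Int), Dom_generatePuzzle width height → Pre_generatePuzzle width height → Spec_generatePuzzle width height (generatePuzzle width height)

-- ===== LEMMAS AND PROOFS =====

-- row of W consecutive integers starting at num
def rowOf (num : Int) : Nat -> List Int
  | 0 => []
  | k + 1 => num :: rowOf (num + 1) k

-- n rows of W consecutive integers each, starting at num
def rowsAux : Nat -> Int -> Nat -> List (List Int)
  | 0, _, _ => []
  | n + 1, num, W => rowOf num W :: rowsAux n (num + W) W

theorem rowOf_eq (W : Nat) : forall num : Int,
    rowOf num W = (List.range W).map (fun j => num + ((j : Nat) : Int)) := by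
  induction W with
  | zero => intro num; simp [rowOf]
  | succ k ih =>
      intro num
      rw [rowOf, ih, List.range_succ_eq_map, List.map_cons, List.map_map]
      simp only [Nat.cast_zero, add_zero, List.cons.injEq, true_and]
      apply List.map_congr_left
      intro j _
      simp only [Function.comp_apply, Nat.cast_succ]
      ring

-- A's inner loop appends num, num+1, ... and advances the counter by the trip count.
theorem innerA : forall (l : List Int) (num : Int) (row : List Int),
    l.foldl stepInner (num, row) = (num + l.length, row ++ rowOf num l.length) := by
  intro l
  induction l with
  | nil => intro num row; simp [rowOf]
  | cons x t ih =>
      intro num row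
      rw [List.foldl_cons]
      show List.foldl stepInner (num + 1, row ++ [num]) t = _
      rw [ih]
      refine Prod.ext ?_ ?_
      · simp only [List.length_cons]; push_cast; ring
      · simp [rowOf, List.append_assoc]

-- A's outer loop: each iteration emits one row of width.toNat consecutive numbers.
theorem outerA (width : Int) :
    forall (l : List Int) (acc : List (List Int)) (num : Int),
    l.foldl (stepOuter width) (acc, num, ([] : List Int)) =
      (acc ++ rowsAux l.length num width.toNat,
        num + (l.length : Int) * (width.toNat : Int), []) := by
  intro l
  induction l with
  | nil => intro acc num; simp [rowsAux]
  | cons x t ih =>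
      intro acc num
      have hlen : (PySem.List.pyRange 1 (width + 1) 1).length = width.toNat := by
        rw [PySem.List.length_pyRange_one]; omega
      rw [List.foldl_cons]
      show List.foldl (stepOuter width)
        (acc ++ [((PySem.List.pyRange 1 (width + 1) 1).foldl stepInner (num, [])).2],
          ((PySem.List.pyRange 1 (width + 1) 1).foldl stepInner (num, [])).1, []) t = _
      rw [innerA, hlen]
      simp only [List.nil_append]
      rw [ih]
      refine Prod.ext ?_ ?_
      · simp [rowsAux, List.append_assoc]
      · simp only [List.length_cons]
        refine Prod.ext ?_ rfl
        push_cast; ring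

-- one slice of B's flat range is one row of A
theorem sliceRow (W H i : Nat) (hi : i < H) :
    PySem.List.slice (PySem.List.pyRange 1 ((W : Int) * (H : Int) + 1) 1)
        (some (((i : Nat) : Int) * (W : Int))) (some ((((i : Nat) : Int) + 1) * (W : Int))) =
      rowOf (1 + ((i : Nat) : Int) * (W : Int)) W := by
  have h1 : ((i : Nat) : Int) * (W : Int) = (((i * W : Nat) : Nat) : Int) := by push_cast; ring
  have h2 : (((i : Nat) : Int) + 1) * (W : Int) = ((((i + 1) * W : Nat) : Nat) : Int) := by
    push_cast; ring
  rw [h1, h2, PySem.List.slice_natCast, PySem.List.pyRange_one]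
  have h3 : ((W : Int) * (H : Int) + 1 - 1).toNat = W * H := by
    have : ((W * H : Nat) : Int) = (W : Int) * (H : Int) := by push_cast; ring
    omega
  rw [h3, rowOf_eq]
  have he : (i + 1) * W = i * W + W := by ring
  have hle : (i + 1) * W <= W * H := by
    calc (i + 1) * W <= H * W := Nat.mul_le_mul_right W hi
      _ = W * H := Nat.mul_comm H W
  apply List.ext_getElem
  · simp only [List.length_take, List.length_drop, List.length_map, List.length_range]
    omega
  · intro n h4 h5
    have hn : n < W := by
      simp only [List.length_map, List.length_range] at h5; exact h5
    have hiw : i * W + n < W * H := by omega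
    simp only [List.getElem_take, List.getElem_drop, List.getElem_map, List.getElem_range]
    push_cast; ring

-- B's comprehension builds exactly rowsAux H 1 W slice by slice.
theorem rowsAux_eq (W : Nat) : forall (n : Nat) (num : Int),
    rowsAux n num W = (List.range n).map (fun i => rowOf (num + ((i : Nat) : Int) * (W : Int)) W) := by
  intro n
  induction n with
  | zero => intro num; simp [rowsAux]
  | succ k ih =>
      intro num
      rw [rowsAux, ih, List.range_succ_eq_map, List.map_cons, List.map_map]
      simp only [Nat.cast_zero, zero_mul, add_zero, List.cons.injEq, true_and]
      apply List.map_congr_left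
      intro j _
      simp only [Function.comp_apply, Nat.cast_succ]
      congr 1
      ring

-- ===== VERDICT (by name: the statement is the Claim_ definition above) =====
theorem generatePuzzle_spec : Claim_equal_generatePuzzle := by
  intro width height _ hpre
  obtain ⟨hw, hh⟩ := hpre
  have hw2 : width = (width.toNat : Int) := (Int.toNat_of_nonneg (by omega)).symm
  have hh2 : height = (height.toNat : Int) := (Int.toNat_of_nonneg (by omega)).symm
  unfold Spec_generatePuzzle generatePuzzle generatePuzzle_alt
  have hlenH : (PySem.List.pyRange 1 (height + 1) 1).length = height.toNat := by
    rw [PySem.List.length_pyRange_one]; omega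
  rw [outerA, hlenH]
  simp only [List.nil_append]
  congr 1
  rw [rowsAux_eq]
  conv_rhs => rw [hw2, hh2]
  rw [PySem.List.pyRange_one 0 ((height.toNat : Int))]
  have hH0 : ((height.toNat : Int) - 0).toNat = height.toNat := by omega
  rw [hH0, List.map_map]
  apply List.map_congr_left
  intro i hi
  have hiH : i < height.toNat := List.mem_range.mp hi
  simp only [Function.comp_apply, zero_add]
  exact (sliceRow width.toNat height.toNat i hiH).symm
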